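-- pv_equiv track=rewrite | github.com/PCBZ/AlgorithmPractise | TikTok_oa/TikTokWatchTime.py | optimizeTikTokWatchTime
-- ===== SOURCE A (Python) =====
-- def optimizeTikTokWatchTime(m: int, initialWatch: [int], repeatWatch: [int]) -> int:
--     n = len(initialWatch)
--     first_round_time = sum([initialWatch[i] + repeatWatch[i] for i in range(n)])
--     if m <= n:
--         return first_round_time
--     sorted_repeated_watch = sorted(repeatWatch)
--     repeatWatch_round_time = sum([repeatWatch[i] for i in range(n)])
--     rest_times = m - n
--     remaining_round = rest_times // n
--     remaining_times = rest_times % n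
--     remaining_watch_times = sum([sorted_repeated_watch[i] for i in range(remaining_times)])
--
--     total_time = first_round_time + remaining_round * repeatWatch_round_time + remaining_watch_times
--     return total_time
-- ===== SOURCE B (Python) =====
-- def _sum_k_smallest(xs, k):
--     # quickselect-style three-way partition: sum of the k smallest values, no full sort
--     if k <= 0:
--         return 0
--     if len(xs) <= k:
--         return sum(xs)
--     p = xs[len(xs) // 2]
--     less = [x for x in xs if x < p]
--     if k <= len(less):
--         return _sum_k_smallest(less, k)
--     equal_count = xs.count(p)
--     if k <= len(less) + equal_count:
--         return sum(less) + (k - len(less)) * p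
--     greater = [x for x in xs if p < x]
--     return sum(less) + equal_count * p + _sum_k_smallest(greater, k - len(less) - equal_count)
--
--
-- def optimizeTikTokWatchTime(m: int, initialWatch: [int], repeatWatch: [int]) -> int:
--     n = len(initialWatch)
--     rep_sum = sum(repeatWatch[:n])
--     base = sum(initialWatch) + rep_sum
--     if m <= n:
--         return base
--     q = (m - n) // n
--     r = (m - n) % n
--     return base + q * rep_sum + _sum_k_smallest(repeatWatch, r)
-- ===== Notes on version B (the rewrite author's own statement) =====
-- stated objective: alternative
-- what changed: Replaces the full sort of repeatWatch (used only to sum its k smallest entries) by a quickselect-style three-way-partition recursion that sums the k smallest directly (expected linear), and computes the round sums via a cached slice sum and divmod arithmetic instead of index comprehensions.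
import Mathlib
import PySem

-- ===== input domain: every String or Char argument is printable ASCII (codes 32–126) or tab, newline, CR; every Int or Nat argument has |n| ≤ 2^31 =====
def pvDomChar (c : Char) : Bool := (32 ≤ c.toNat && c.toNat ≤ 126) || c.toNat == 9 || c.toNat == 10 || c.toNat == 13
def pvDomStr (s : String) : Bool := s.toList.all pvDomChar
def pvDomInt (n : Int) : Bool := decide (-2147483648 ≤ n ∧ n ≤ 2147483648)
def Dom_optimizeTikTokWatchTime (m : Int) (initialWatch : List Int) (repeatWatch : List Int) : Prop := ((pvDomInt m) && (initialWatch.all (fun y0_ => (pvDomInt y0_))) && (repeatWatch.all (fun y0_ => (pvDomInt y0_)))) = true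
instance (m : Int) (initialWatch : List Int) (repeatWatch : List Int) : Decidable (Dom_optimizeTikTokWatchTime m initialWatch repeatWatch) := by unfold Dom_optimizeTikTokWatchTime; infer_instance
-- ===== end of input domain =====

-- B replaces the full sort by a quickselect-style three-way-partition sum of the k smallest
-- repeat values (objective: alternative algorithm; expected-linear selection instead of sorting).

-- B replaces the full sort by a quickselect-style three-way-partition sum of the k smallest
-- repeat values (objective: alternative algorithm; expected-linear selection instead of sorting).

-- ===== PORT A =====
def optimizeTikTokWatchTime (m : Int) (initialWatch : List Int) (repeatWatch : List Int) : Int :=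
  let n : Int := initialWatch.length
  let first_round_time : Int :=
    ((PySem.List.pyRange 0 n 1).map (fun i =>
      PySem.List.pyGetD initialWatch i 0 + PySem.List.pyGetD repeatWatch i 0)).sum
  if m ≤ n then first_round_time
  else
    let sorted_repeated_watch := PySem.List.sorted repeatWatch (fun x => x) false
    let repeatWatch_round_time : Int :=
      ((PySem.List.pyRange 0 n 1).map (fun i => PySem.List.pyGetD repeatWatch i 0)).sum
    let rest_times := m - n
    let remaining_round := PySem.Int.floordiv rest_times n
    let remaining_times := PySem.Int.mod rest_times n
    let remaining_watch_times : Int :=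
      ((PySem.List.pyRange 0 remaining_times 1).map (fun i =>
        PySem.List.pyGetD sorted_repeated_watch i 0)).sum
    first_round_time + remaining_round * repeatWatch_round_time + remaining_watch_times

-- ===== PORT B =====
-- sum of the k smallest elements via three-way partition around a middle pivot (B's
-- _sum_k_smallest); fuel = xs.length bounds the recursion depth (each recursive call
-- drops at least the pivot, so the fuel never runs out)
def sumKSmallestBAux : Nat → List Int → Int → Int
  | 0, _, _ => 0
  | fuel + 1, xs, k =>
    if k ≤ 0 then 0
    else if (xs.length : Int) ≤ k then xs.sum
    else
      let p := PySem.List.pyGetD xs (PySem.Int.floordiv (xs.length : Int) 2) 0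
      let less := xs.filter (fun x => x < p)
      if k ≤ (less.length : Int) then sumKSmallestBAux fuel less k
      else
        let equalCount : Int := PySem.List.count xs p
        if k ≤ (less.length : Int) + equalCount then
          less.sum + (k - less.length) * p
        else
          let greater := xs.filter (fun x => p < x)
          less.sum + equalCount * p + sumKSmallestBAux fuel greater (k - less.length - equalCount)

def sumKSmallestB (xs : List Int) (k : Int) : Int := sumKSmallestBAux xs.length xs k

def optimizeTikTokWatchTime_alt (m : Int) (initialWatch : List Int) (repeatWatch : List Int) : Int :=
  let n : Int := initialWatch.length
  let repSum : Int := (PySem.List.slice repeatWatch none (some n)).sum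
  let base : Int := initialWatch.sum + repSum
  if m ≤ n then base
  else
    let q := PySem.Int.floordiv (m - n) n
    let r := PySem.Int.mod (m - n) n
    base + q * repSum + sumKSmallestB repeatWatch r

-- ===== PRECONDITION & SPEC =====
-- Pre_ excludes exactly the inputs where A raises: IndexError when repeatWatch is shorter
-- than initialWatch, and ZeroDivisionError when initialWatch is empty and m > 0.
def Pre_optimizeTikTokWatchTime (m : Int) (initialWatch : List Int) (repeatWatch : List Int) : Prop :=
  initialWatch.length ≤ repeatWatch.length ∧ (initialWatch = [] → m ≤ 0)
instance (m : Int) (initialWatch : List Int) (repeatWatch : List Int) : Decidable (Pre_optimizeTikTokWatchTime m initialWatch repeatWatch) := by unfold Pre_optimizeTikTokWatchTime; infer_instance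
def pvWitness_optimizeTikTokWatchTime : Int × List Int × List Int := (7, [1, 2], [3, 1])

def Spec_optimizeTikTokWatchTime (m : Int) (initialWatch : List Int) (repeatWatch : List Int) (out : Int) : Prop := out = optimizeTikTokWatchTime_alt m initialWatch repeatWatch
instance (m : Int) (initialWatch : List Int) (repeatWatch : List Int) (out : Int) : Decidable (Spec_optimizeTikTokWatchTime m initialWatch repeatWatch out) := by unfold Spec_optimizeTikTokWatchTime; infer_instance

-- ===== CLAIM (what is proved, stated in full; the proofs are below) =====
def Claim_equal_optimizeTikTokWatchTime : Prop := ∀ (m : Int) (initialWatch : List Int) (repeatWatch : List Int), Dom_optimizeTikTokWatchTime m initialWatch repeatWatch → Pre_optimizeTikTokWatchTime m initialWatch repeatWatch → Spec_optimizeTikTokWatchTime m initialWatch repeatWatch (optimizeTikTokWatchTime m initialWatch repeatWatch)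

-- ===== LEMMAS AND PROOFS =====

theorem pvFilterLtLen {p : Int → Bool} {xs : List Int} {x : Int}
    (hx : x ∈ xs) (hpx : p x = false) : (xs.filter p).length < xs.length :=
  List.length_filter_lt_length_iff_exists.mpr ⟨x, hx, by simp [hpx]⟩

theorem pvPivotMem (xs : List Int) (h : 1 ≤ xs.length) :
    PySem.List.pyGetD xs (PySem.Int.floordiv (xs.length : Int) 2) 0 ∈ xs := by
  apply PySem.List.pyGetD_mem
  rw [PySem.Int.floordiv_eq_ediv_of_pos (by omega)]
  constructor <;> omega

-- sum over range(k) of xs[i] is the sum of the first k elements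
theorem pvMapRangeTake (xs : List Int) (d : Int) (k : Nat) (hk : k ≤ xs.length) :
    (PySem.List.pyRange 0 (k : Int) 1).map (fun i => PySem.List.pyGetD xs i d) = xs.take k := by
  induction k with
  | zero => simp [PySem.List.pyRange_one_eq_nil]
  | succ j ih =>
    rw [show ((j + 1 : Nat) : Int) = (j : Int) + 1 by push_cast; ring,
        PySem.List.pyRange_one_succ_right (by exact_mod_cast j.zero_le),
        List.map_append, ih (by omega)]
    have h2 : j < xs.length := by omega
    rw [List.map_singleton, List.take_add_one, List.getElem?_eq_getElem h2]
    simp [List.getD_eq_getElem?_getD, List.getElem?_eq_getElem h2]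

theorem pvSumConst (l : List Int) (p : Int) (h : ∀ x ∈ l, x = p) :
    l.sum = l.length * p := by
  induction l with
  | nil => simp
  | cons a t ih =>
    simp only [List.sum_cons, List.length_cons, ih (fun x hx => h x (by simp [hx])),
      h a (by simp)]
    push_cast
    ring

theorem pvFilter3Perm (p : Int) (xs : List Int) :
    (xs.filter (fun x => x < p) ++ xs.filter (fun x => x == p) ++ xs.filter (fun x => p < x)).Perm xs := by
  have h1 : (xs.filter (fun x => !(decide (x < p)))).filter (fun x => x == p)
      = xs.filter (fun x => x == p) := by
    rw [List.filter_filter]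
    apply List.filter_congr
    intro x _
    by_cases hx : x = p <;> simp [hx]
  have h2 : (xs.filter (fun x => !(decide (x < p)))).filter (fun x => !(x == p))
      = xs.filter (fun x => p < x) := by
    rw [List.filter_filter]
    apply List.filter_congr
    intro x _
    by_cases hx : x = p
    · simp [hx]
    · by_cases hx2 : x < p
      · simp [hx2, show ¬ p < x by omega]
      · simp [hx, hx2, show p < x by omega]
  have h3 := List.filter_append_perm (fun x => x == p) (xs.filter (fun x => !(decide (x < p))))
  rw [h1, h2] at h3
  have h4 := List.filter_append_perm (fun x => decide (x < p)) xs
  rw [List.append_assoc]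
  exact (List.Perm.append_left _ h3).trans h4

theorem pvSortedDecomp (xs : List Int) (p : Int) :
    PySem.List.sorted xs (fun x => x) false =
      PySem.List.sorted (xs.filter (fun x => x < p)) (fun x => x) false
        ++ xs.filter (fun x => x == p)
        ++ PySem.List.sorted (xs.filter (fun x => p < x)) (fun x => x) false := by
  apply PySem.List.sorted_id_eq_of_perm_of_pairwise
  · exact ((((PySem.List.sorted_perm _ _ _).append_right _).append
      (PySem.List.sorted_perm _ _ _))).trans (pvFilter3Perm p xs)
  · rw [List.pairwise_append, List.pairwise_append]
    refine ⟨⟨PySem.List.sorted_pairwise _ _, ?_, ?_⟩, PySem.List.sorted_pairwise _ _, ?_⟩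
    · exact List.pairwise_of_forall_mem_list (fun a ha b hb => by
        simp only [List.mem_filter, beq_iff_eq] at ha hb; omega)
    · intro a ha b hb
      rw [PySem.List.mem_sorted, List.mem_filter] at ha
      rw [List.mem_filter] at hb
      simp only [beq_iff_eq, decide_eq_true_eq] at ha hb; omega
    · intro a ha b hb
      rw [List.mem_append] at ha
      rw [PySem.List.mem_sorted, List.mem_filter] at hb
      rcases ha with ha | ha <;>
        [rw [PySem.List.mem_sorted, List.mem_filter] at ha; rw [List.mem_filter] at ha] <;>
        simp only [beq_iff_eq, decide_eq_true_eq] at ha hb <;> omega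

-- B's helper computes the sum of take k of the sorted list
theorem pvSumKAuxEq : ∀ (N : Nat) (xs : List Int), xs.length ≤ N → ∀ (k : Int),
    sumKSmallestBAux N xs k = ((PySem.List.sorted xs (fun x => x) false).take k.toNat).sum := by
  intro N
  induction N with
  | zero =>
    intro xs hxs k
    have : xs = [] := List.eq_nil_of_length_eq_zero (by omega)
    subst this
    simp [sumKSmallestBAux, PySem.List.sorted]
  | succ N ih =>
    intro xs hxs k
    rw [sumKSmallestBAux]
    dsimp only
    split_ifs with hk hn hl hm
    · have h0 : k.toNat = 0 := by omega
      simp [h0]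
    · have hw : (PySem.List.sorted xs (fun x => x) false).length ≤ k.toNat := by
        rw [PySem.List.length_sorted]; omega
      rw [List.take_of_length_le hw]
      exact ((PySem.List.sorted_perm xs (fun x => x) false).sum_eq).symm
    · -- k ≤ |less|: recurse on less
      set p := PySem.List.pyGetD xs (PySem.Int.floordiv (xs.length : Int) 2) 0 with hp
      have hpmem : p ∈ xs := by rw [hp]; exact pvPivotMem xs (by omega)
      have hplt : (xs.filter (fun x => x < p)).length < xs.length :=
        pvFilterLtLen hpmem (by simp)
      rw [ih _ (by omega) k, pvSortedDecomp xs p, List.take_append,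
        List.take_append]
      have hSL : (PySem.List.sorted (xs.filter (fun x => x < p)) (fun x => x) false).length
          = (xs.filter (fun x => x < p)).length := PySem.List.length_sorted _ _ _
      have h1 : k.toNat - (PySem.List.sorted (xs.filter (fun x => x < p)) (fun x => x) false).length = 0 := by
        rw [hSL]; omega
      have h2 : k.toNat - (PySem.List.sorted (xs.filter (fun x => x < p)) (fun x => x) false
          ++ xs.filter (fun x => x == p)).length = 0 := by
        rw [List.length_append, hSL]; omega
      rw [h1, h2]
      simp
    · -- |less| < k ≤ |less| + |equal|
      set p := PySem.List.pyGetD xs (PySem.Int.floordiv (xs.length : Int) 2) 0 with hp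
      simp only [PySem.List.count_eq, List.count_eq_countP, List.countP_eq_length_filter] at hm ⊢
      rw [pvSortedDecomp xs p, List.take_append, List.take_append]
      have hSL : (PySem.List.sorted (xs.filter (fun x => x < p)) (fun x => x) false).length
          = (xs.filter (fun x => x < p)).length := PySem.List.length_sorted _ _ _
      have hEq : ∀ x ∈ xs.filter (fun x => x == p), x = p := by
        intro x hx
        simpa using (List.mem_filter.mp hx).2
      have h2 : k.toNat - (PySem.List.sorted (xs.filter (fun x => x < p)) (fun x => x) false
          ++ xs.filter (fun x => x == p)).length = 0 := by
        rw [List.length_append, hSL]; omega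
      rw [h2, List.take_of_length_le (show (PySem.List.sorted (xs.filter (fun x => x < p)) (fun x => x) false).length ≤ k.toNat by rw [hSL]; omega), List.take_zero]
      have hTakeEq : ((xs.filter (fun x => x == p)).take
          (k.toNat - (PySem.List.sorted (xs.filter (fun x => x < p)) (fun x => x) false).length)).sum
          = (k - (xs.filter (fun x => x < p)).length) * p := by
        rw [pvSumConst _ p (fun x hx => hEq x (List.mem_of_mem_take hx)),
          List.length_take, hSL]
        have : min (k.toNat - (xs.filter (fun x => x < p)).length)
            (xs.filter (fun x => x == p)).length = k.toNat - (xs.filter (fun x => x < p)).length := by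
          omega
        rw [this]
        congr 1
        omega
      rw [List.sum_append, List.sum_append, List.sum_nil, hTakeEq,
        (PySem.List.sorted_perm (xs.filter (fun x => x < p)) (fun x => x) false).sum_eq]
      ring
    · -- k > |less| + |equal|: recurse on greater
      set p := PySem.List.pyGetD xs (PySem.Int.floordiv (xs.length : Int) 2) 0 with hp
      simp only [PySem.List.count_eq, List.count_eq_countP, List.countP_eq_length_filter] at hm ⊢
      have hpmem : p ∈ xs := by rw [hp]; exact pvPivotMem xs (by omega)
      have hglt : (xs.filter (fun x => p < x)).length < xs.length :=
        pvFilterLtLen hpmem (by simp)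
      have hEq : ∀ x ∈ xs.filter (fun x => x == p), x = p := by
        intro x hx
        simpa using (List.mem_filter.mp hx).2
      rw [pvSortedDecomp xs p, List.take_append, List.take_append]
      have hSL : (PySem.List.sorted (xs.filter (fun x => x < p)) (fun x => x) false).length
          = (xs.filter (fun x => x < p)).length := PySem.List.length_sorted _ _ _
      have t1 : (PySem.List.sorted (xs.filter (fun x => x < p)) (fun x => x) false).length
          ≤ k.toNat := by rw [hSL]; omega
      have t2 : (xs.filter (fun x => x == p)).length
          ≤ k.toNat - (PySem.List.sorted (xs.filter (fun x => x < p)) (fun x => x) false).length := by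
        rw [hSL]; omega
      rw [List.take_of_length_le t1, List.take_of_length_le t2,
        ih _ (by omega) (k - ((xs.filter (fun x => x < p)).length : Int)
          - ((xs.filter (fun x => x == p)).length : Int))]
      have harg : (k - ((xs.filter (fun x => x < p)).length : Int)
          - ((xs.filter (fun x => x == p)).length : Int)).toNat
          = k.toNat - (PySem.List.sorted (xs.filter (fun x => x < p)) (fun x => x) false
            ++ xs.filter (fun x => x == p)).length := by
        rw [List.length_append, hSL]; omega
      rw [harg, List.sum_append, List.sum_append,
        (PySem.List.sorted_perm (xs.filter (fun x => x < p)) (fun x => x) false).sum_eq,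
        pvSumConst _ p hEq]

theorem pvModBounds (a b : Int) (hb : 0 < b) :
    0 ≤ PySem.Int.mod a b ∧ PySem.Int.mod a b < b := by
  rw [PySem.Int.mod_eq_emod_of_pos hb]
  exact ⟨Int.emod_nonneg a (by omega), Int.emod_lt_of_pos a hb⟩

theorem pvSumMapAdd (l : List Int) (f g : Int → Int) :
    (l.map (fun i => f i + g i)).sum = (l.map f).sum + (l.map g).sum := by
  induction l with
  | nil => simp
  | cons a t ih => simp [ih]; ring

-- ===== VERDICT (by name: the statement is the Claim_ definition above) =====
theorem optimizeTikTokWatchTime_spec : Claim_equal_optimizeTikTokWatchTime := by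
  intro m iw rw _ hpre
  obtain ⟨hlen, hnil⟩ := hpre
  unfold Spec_optimizeTikTokWatchTime optimizeTikTokWatchTime optimizeTikTokWatchTime_alt
  simp only []
  have hslice : PySem.List.slice rw none (some (iw.length : Int)) = rw.take iw.length :=
    PySem.List.slice_to_natCast rw iw.length
  have hfirst : ((PySem.List.pyRange 0 (iw.length : Int) 1).map (fun i =>
      PySem.List.pyGetD iw i 0 + PySem.List.pyGetD rw i 0)).sum
      = iw.sum + (PySem.List.slice rw none (some (iw.length : Int))).sum := by
    rw [pvSumMapAdd, pvMapRangeTake iw 0 iw.length le_rfl, pvMapRangeTake rw 0 iw.length hlen,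
      List.take_of_length_le le_rfl, hslice]
  by_cases hm : m ≤ (iw.length : Int)
  · simp [hm, hfirst]
  · simp only [hm, if_false]
    have hn1 : 1 ≤ iw.length := by
      rcases Nat.eq_zero_or_pos iw.length with h0 | h1
      · exfalso
        have := hnil (List.eq_nil_of_length_eq_zero h0)
        omega
      · exact h1
    obtain ⟨hr0, hr1⟩ := pvModBounds (m - iw.length) iw.length (by exact_mod_cast hn1)
    have hrep : ((PySem.List.pyRange 0 (iw.length : Int) 1).map (fun i =>
        PySem.List.pyGetD rw i 0)).sum = (PySem.List.slice rw none (some (iw.length : Int))).sum := by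
      rw [pvMapRangeTake rw 0 iw.length hlen, hslice]
    have hsortlen : (PySem.List.sorted rw (fun x => x) false).length = rw.length :=
      PySem.List.length_sorted _ _ _
    have hrem : ((PySem.List.pyRange 0 (PySem.Int.mod (m - iw.length) iw.length) 1).map (fun i =>
        PySem.List.pyGetD (PySem.List.sorted rw (fun x => x) false) i 0)).sum
        = sumKSmallestB rw (PySem.Int.mod (m - iw.length) iw.length) := by
      rw [sumKSmallestB, pvSumKAuxEq rw.length rw le_rfl]
      have hc : ((PySem.Int.mod (m - iw.length) iw.length).toNat : Int)
          = PySem.Int.mod (m - iw.length) iw.length := by omega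
      rw [← hc, pvMapRangeTake _ 0 _ (by rw [hsortlen]; omega)]
      have ht : (((PySem.Int.mod (m - iw.length) iw.length).toNat : Int)).toNat
          = (PySem.Int.mod (m - iw.length) iw.length).toNat := by omega
      rw [ht]
    rw [hfirst, hrep, hrem]
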